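-- pv_equiv track=rewrite | github.com/Solitariaaa/my-first-project | 1.py | getMaxGoodSubarrayLength
-- ===== SOURCE A (Python) =====
-- def getMaxGoodSubarrayLength(limit, financialMetrics):
--     n = len(financialMetrics)
--
--     left = [-1] * n
--     right = [n] * n
--
--     # 使用单调栈找到每个元素的左边界
--     stack = []
--     for i in range(n):
--         while stack and financialMetrics[stack[-1]] >= financialMetrics[i]:
--             stack.pop()
--         if stack:
--             left[i] = stack[-1]
--         stack.append(i)
--
--
--     # 使用单调栈找到每个元素的右边界
--     stack = []
--     for i in range(n):
--         while stack and financialMetrics[stack[-1]] >= financialMetrics[i]: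
--             right[stack[-1]] = i
--             stack.pop()
--         stack.append(i)
--
--     max_length = -1
--     for i in range(n):
--         length = right[i] - left[i] - 1
--         if financialMetrics[i] * length > limit:
--             max_length = max(max_length, length)
--
--     return max_length
-- ===== SOURCE B (Python) =====
-- def getMaxGoodSubarrayLength(limit, financialMetrics):
--     m = financialMetrics
--     n = len(m)
--     best = -1
--     stack = []
--     for i in range(n + 1):
--         # sentinel i == n drains the stack with right boundary n
--         while stack and (i == n or m[stack[-1]] >= m[i]):
--             j = stack.pop()
--             left = stack[-1] if stack else -1
--             length = i - left - 1
--             if m[j] * length > limit and length > best: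
--                 best = length
--         if i < n:
--             stack.append(i)
--     return best
-- ===== Notes on version B (the rewrite author's own statement) =====
-- stated objective: simpler
-- what changed: A makes three passes (a monotonic-stack pass filling a left-boundary array, a second stack pass filling a right-boundary array, then a scan combining them); B is one fused monotonic-stack pass with a sentinel index that computes each popped element's window from the stack top and updates the answer immediately, with no boundary arrays.
import Mathlib
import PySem

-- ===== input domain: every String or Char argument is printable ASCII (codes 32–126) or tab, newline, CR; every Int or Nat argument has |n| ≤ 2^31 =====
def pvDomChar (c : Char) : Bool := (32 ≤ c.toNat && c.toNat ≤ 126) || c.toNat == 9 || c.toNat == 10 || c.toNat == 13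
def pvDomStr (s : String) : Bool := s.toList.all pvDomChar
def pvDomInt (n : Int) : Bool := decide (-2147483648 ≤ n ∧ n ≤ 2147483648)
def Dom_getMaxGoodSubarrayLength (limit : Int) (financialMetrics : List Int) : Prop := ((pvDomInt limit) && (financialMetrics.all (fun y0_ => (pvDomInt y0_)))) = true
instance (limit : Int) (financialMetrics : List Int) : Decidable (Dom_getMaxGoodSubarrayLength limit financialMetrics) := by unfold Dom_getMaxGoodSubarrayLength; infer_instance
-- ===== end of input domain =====

-- ===== PORT A =====
-- B replaces A's three passes (left-boundary stack pass, right-boundary stack pass,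
-- final scan over the boundary arrays) by ONE fused monotonic-stack pass that updates
-- the answer at pop time; objective: simpler (no auxiliary boundary arrays).

-- the inner 'while stack and financialMetrics[stack[-1]] >= financialMetrics[i]: stack.pop()'
-- (indices on the stack are always in range, so List.getD is exact here)
def aPop (m : List Int) (x : Int) : List Nat → List Nat
  | [] => []
  | j :: st => if x ≤ m.getD j 0 then aPop m x st else j :: st

-- one iteration of A's first loop: state = (stack, left)
def aLeftStep (m : List Int) (s : List Nat × List Int) (i : Nat) : List Nat × List Int :=
  let st := aPop m (m.getD i 0) s.1
  let lft := match st with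
    | [] => s.2
    | j :: _ => s.2.set i (j : Int)
  (i :: st, lft)

-- the inner while of A's second loop: assigns right[stack[-1]] = i while popping
def aPopR (m : List Int) (x : Int) (i : Nat) : List Nat → List Int → List Nat × List Int
  | [], r => ([], r)
  | j :: st, r => if x ≤ m.getD j 0 then aPopR m x i st (r.set j (i : Int)) else (j :: st, r)

-- one iteration of A's second loop: state = (stack, right)
def aRightStep (m : List Int) (s : List Nat × List Int) (i : Nat) : List Nat × List Int :=
  let p := aPopR m (m.getD i 0) i s.1 s.2
  (i :: p.1, p.2)

def getMaxGoodSubarrayLength (limit : Int) (financialMetrics : List Int) : Int :=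
  let n := financialMetrics.length
  let lft := ((List.range n).foldl (aLeftStep financialMetrics) ([], List.replicate n (-1))).2
  let rgt := ((List.range n).foldl (aRightStep financialMetrics) ([], List.replicate n (n : Int))).2
  (List.range n).foldl (fun best i =>
    let length := rgt.getD i 0 - lft.getD i 0 - 1
    if limit < financialMetrics.getD i 0 * length then max best length else best) (-1)

-- ===== PORT B =====
-- 'stack[-1] if stack else -1'
def topVal : List Nat → Int
  | [] => -1
  | t :: _ => (t : Int)

-- B's inner while: pop while (i == n or m[stack[-1]] >= m[i]), updating best at pop time
def bPop (limit : Int) (m : List Int) (n i : Nat) : List Nat → Int → List Nat × Int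
  | [], best => ([], best)
  | j :: st, best =>
    if i = n ∨ m.getD i 0 ≤ m.getD j 0 then
      let lft : Int := topVal st
      let length := (i : Int) - lft - 1
      bPop limit m n i st (if limit < m.getD j 0 * length ∧ best < length then length else best)
    else (j :: st, best)

-- one iteration of B's single loop over range(n+1): state = (stack, best)
def bStep (limit : Int) (m : List Int) (n : Nat) (s : List Nat × Int) (i : Nat) : List Nat × Int :=
  let p := bPop limit m n i s.1 s.2
  (if i < n then i :: p.1 else p.1, p.2)

def getMaxGoodSubarrayLength_alt (limit : Int) (financialMetrics : List Int) : Int :=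
  let n := financialMetrics.length
  ((List.range (n + 1)).foldl (bStep limit financialMetrics n) ([], -1)).2

-- ===== PRECONDITION & SPEC =====
def Spec_getMaxGoodSubarrayLength (limit : Int) (financialMetrics : List Int) (out : Int) : Prop := out = getMaxGoodSubarrayLength_alt limit financialMetrics
instance (limit : Int) (financialMetrics : List Int) (out : Int) : Decidable (Spec_getMaxGoodSubarrayLength limit financialMetrics out) := by unfold Spec_getMaxGoodSubarrayLength; infer_instance

-- ===== CLAIM (what is proved, stated in full; the proofs are below) =====
def Claim_equal_getMaxGoodSubarrayLength : Prop := ∀ (limit : Int) (financialMetrics : List Int), Dom_getMaxGoodSubarrayLength limit financialMetrics → Spec_getMaxGoodSubarrayLength limit financialMetrics (getMaxGoodSubarrayLength limit financialMetrics)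

-- ===== LEMMAS AND PROOFS =====

-- the contribution of index j to the running maximum, given boundary arrays L and R
def contrib (limit : Int) (m L R : List Int) (b : Int) (j : Nat) : Int :=
  if limit < m.getD j 0 * (R.getD j 0 - L.getD j 0 - 1)
  then max b (R.getD j 0 - L.getD j 0 - 1) else b

-- "each stack entry's left[] value is the entry beneath it (-1 at the bottom)"
def chainL (L : List Int) : List Nat → Prop
  | [] => True
  | [j] => L.getD j 0 = -1
  | j :: u :: st => L.getD j 0 = (u : Int) ∧ chainL L (u :: st)

-- joint pop phase: evolves stack, right array and best simultaneously
def jPop (limit : Int) (m : List Int) (x : Int) (i : Nat) :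
    List Nat → List Int → Int → List Nat × List Int × Int
  | [], R, b => ([], R, b)
  | j :: st, R, b =>
    if x ≤ m.getD j 0 then
      let lft : Int := topVal st
      let len := (i : Int) - lft - 1
      jPop limit m x i st (R.set j (i : Int))
        (if limit < m.getD j 0 * len ∧ b < len then len else b)
    else (j :: st, R, b)

-- joint step: state = (stack, left, right, best)
def jStep (limit : Int) (m : List Int) (s : List Nat × List Int × List Int × Int) (i : Nat) :
    List Nat × List Int × List Int × Int :=
  let p := jPop limit m (m.getD i 0) i s.1 s.2.2.1 s.2.2.2
  let L := match p.1 with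
    | [] => s.2.1
    | j :: _ => s.2.1.set i (j : Int)
  (i :: p.1, L, p.2)

def jRun (limit : Int) (m : List Int) (n i : Nat) : List Nat × List Int × List Int × Int :=
  (List.range i).foldl (jStep limit m)
    ([], List.replicate n (-1), List.replicate n (n : Int), -1)

-- small getD/set helpers -------------------------------------------------------

theorem getD_set_self (l : List Int) (i : Nat) (a d : Int) (h : i < l.length) :
    (l.set i a).getD i d = a := by
  simp [List.getD, h]

theorem getD_set_ne (l : List Int) (i j : Nat) (a d : Int) (h : i ≠ j) :
    (l.set i a).getD j d = l.getD j d := by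
  simp [List.getD, List.getElem?_set_ne h]

-- chainL facts ------------------------------------------------------------------

theorem chainL_tail (L : List Int) (j : Nat) (st : List Nat) (h : chainL L (j :: st)) :
    chainL L st := by
  cases st with
  | nil => trivial
  | cons u t => exact h.2

theorem chainL_suffix (L : List Int) : ∀ (a st : List Nat), chainL L (a ++ st) → chainL L st
  | [], _, h => h
  | j :: a, st, h => chainL_suffix L a st (chainL_tail L j (a ++ st) h)

theorem chainL_congr (L L' : List Int) : ∀ (st : List Nat),
    (∀ j ∈ st, L'.getD j 0 = L.getD j 0) → chainL L st → chainL L' st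
  | [], _, _ => trivial
  | [j], h, hc => by
      show L'.getD j 0 = -1
      rw [h j (by simp)]; exact hc
  | j :: u :: st, h, hc => by
      refine ⟨by rw [h j (by simp)]; exact hc.1, ?_⟩
      exact chainL_congr L L' (u :: st) (fun k hk => h k (List.mem_cons_of_mem _ hk)) hc.2

theorem chainL_head (L : List Int) (j : Nat) (st : List Nat) (h : chainL L (j :: st)) :
    L.getD j 0 = topVal st := by
  cases st with
  | nil => exact h
  | cons u t => exact h.1

-- projection lemmas --------------------------------------------------------------

theorem jPop_fst (limit : Int) (m : List Int) (x : Int) (i : Nat) :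
    ∀ (st : List Nat) (R : List Int) (b : Int),
      (jPop limit m x i st R b).1 = aPop m x st
  | [], R, b => rfl
  | j :: st, R, b => by
      simp only [jPop, aPop]
      by_cases h : x ≤ m.getD j 0
      · rw [if_pos h, if_pos h, jPop_fst limit m x i st]
      · rw [if_neg h, if_neg h]

theorem jPop_len (limit : Int) (m : List Int) (x : Int) (i : Nat) :
    ∀ (st : List Nat) (R : List Int) (b : Int),
      (jPop limit m x i st R b).2.1.length = R.length
  | [], R, b => rfl
  | j :: st, R, b => by
      simp only [jPop]
      by_cases h : x ≤ m.getD j 0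
      · rw [if_pos h, jPop_len limit m x i st, List.length_set]
      · rw [if_neg h]

theorem jPop_right (limit : Int) (m : List Int) (x : Int) (i : Nat) :
    ∀ (st : List Nat) (R : List Int) (b : Int),
      (jPop limit m x i st R b).2.1 = (aPopR m x i st R).2 ∧
      (aPopR m x i st R).1 = aPop m x st
  | [], R, b => ⟨rfl, rfl⟩
  | j :: st, R, b => by
      simp only [jPop, aPopR, aPop]
      by_cases h : x ≤ m.getD j 0
      · rw [if_pos h, if_pos h, if_pos h]
        exact jPop_right limit m x i st (R.set j (i : Int)) _
      · rw [if_neg h, if_neg h, if_neg h]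
        exact ⟨rfl, rfl⟩

theorem bPop_eq (limit : Int) (m : List Int) (n i : Nat) (hin : i ≠ n) :
    ∀ (st : List Nat) (R : List Int) (b : Int),
      bPop limit m n i st b
        = ((jPop limit m (m.getD i 0) i st R b).1, (jPop limit m (m.getD i 0) i st R b).2.2)
  | [], R, b => rfl
  | j :: st, R, b => by
      simp only [bPop, jPop]
      by_cases h : m.getD i 0 ≤ m.getD j 0
      · rw [if_pos (Or.inr h : i = n ∨ m.getD i 0 ≤ m.getD j 0), if_pos h]
        exact bPop_eq limit m n i hin st _ _
      · rw [if_neg (fun hc => hc.elim hin h : ¬(i = n ∨ m.getD i 0 ≤ m.getD j 0)), if_neg h]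

theorem jRun_succ (limit : Int) (m : List Int) (n i : Nat) :
    jRun limit m n (i + 1) = jStep limit m (jRun limit m n i) i := by
  unfold jRun
  rw [List.range_succ, List.foldl_append, List.foldl_cons, List.foldl_nil]

theorem step_left (limit : Int) (m : List Int) (i : Nat)
    (s : List Nat × List Int × List Int × Int) :
    aLeftStep m (s.1, s.2.1) i = ((jStep limit m s i).1, (jStep limit m s i).2.1) := by
  obtain ⟨st, L, R, b⟩ := s
  simp only [aLeftStep, jStep, jPop_fst]

theorem step_right (limit : Int) (m : List Int) (i : Nat)
    (s : List Nat × List Int × List Int × Int) :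
    aRightStep m (s.1, s.2.2.1) i = ((jStep limit m s i).1, (jStep limit m s i).2.2.1) := by
  obtain ⟨st, L, R, b⟩ := s
  simp only [aRightStep, jStep]
  rw [(jPop_right limit m (m.getD i 0) i st R b).1,
    (jPop_right limit m (m.getD i 0) i st R b).2, jPop_fst]

theorem step_b (limit : Int) (m : List Int) (n i : Nat) (hi : i < n)
    (s : List Nat × List Int × List Int × Int) :
    bStep limit m n (s.1, s.2.2.2) i = ((jStep limit m s i).1, (jStep limit m s i).2.2.2) := by
  obtain ⟨st, L, R, b⟩ := s
  simp only [bStep, jStep, bPop_eq limit m n i (Nat.ne_of_lt hi) st R b]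
  simp [hi]

theorem left_proj (limit : Int) (m : List Int) (n : Nat) : ∀ (i : Nat),
    (List.range i).foldl (aLeftStep m) ([], List.replicate n (-1))
      = ((jRun limit m n i).1, (jRun limit m n i).2.1)
  | 0 => rfl
  | i + 1 => by
      rw [List.range_succ, List.foldl_append, left_proj limit m n i, jRun_succ]
      exact step_left limit m i (jRun limit m n i)

theorem right_proj (limit : Int) (m : List Int) (n : Nat) : ∀ (i : Nat),
    (List.range i).foldl (aRightStep m) ([], List.replicate n (n : Int))
      = ((jRun limit m n i).1, (jRun limit m n i).2.2.1)
  | 0 => rfl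
  | i + 1 => by
      rw [List.range_succ, List.foldl_append, right_proj limit m n i, jRun_succ]
      exact step_right limit m i (jRun limit m n i)

theorem b_proj (limit : Int) (m : List Int) (n : Nat) : ∀ (i : Nat), i ≤ n →
    (List.range i).foldl (bStep limit m n) ([], -1)
      = ((jRun limit m n i).1, (jRun limit m n i).2.2.2)
  | 0, _ => rfl
  | i + 1, hi => by
      rw [List.range_succ, List.foldl_append, b_proj limit m n i (Nat.le_of_succ_le hi), jRun_succ]
      exact step_b limit m n i hi (jRun limit m n i)

-- conditional-max bridge: B's in-place update equals A's max form
theorem ifmax (limit v len b : Int) :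
    (if limit < v * len ∧ b < len then len else b)
      = (if limit < v * len then max b len else b) := by
  split_ifs <;> omega

-- the crux: one pop phase, fully described ---------------------------------------

theorem jPop_spec (limit : Int) (m : List Int) (x : Int) (i : Nat) (L : List Int) :
    ∀ (st : List Nat) (R : List Int) (b : Int),
      st.Nodup → chainL L st →
      ∃ popped : List Nat,
        popped ++ (jPop limit m x i st R b).1 = st ∧
        (∀ j, j ∉ popped → (jPop limit m x i st R b).2.1.getD j 0 = R.getD j 0) ∧
        (∀ j ∈ popped, j < R.length → (jPop limit m x i st R b).2.1.getD j 0 = (i : Int)) ∧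
        (jPop limit m x i st R b).2.2 =
          popped.foldl (fun b j =>
            if limit < m.getD j 0 * ((i : Int) - L.getD j 0 - 1)
            then max b ((i : Int) - L.getD j 0 - 1) else b) b := by
  intro st
  induction st with
  | nil => exact fun R b _ _ => ⟨[], rfl, fun _ _ => rfl, by simp, rfl⟩
  | cons j st ih =>
    intro R b hnd hch
    by_cases h : x ≤ m.getD j 0
    · have hjst : j ∉ st := (List.nodup_cons.1 hnd).1
      have heq : jPop limit m x i (j :: st) R b
          = jPop limit m x i st (R.set j (i : Int))
              (if limit < m.getD j 0 * ((i : Int) - topVal st - 1) ∧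
                  b < (i : Int) - topVal st - 1
               then (i : Int) - topVal st - 1
               else b) := by
        simp only [jPop]; rw [if_pos h]
      rw [← chainL_head L j st hch] at heq
      obtain ⟨p, hp1, hp2, hp3, hp4⟩ :=
        ih (R.set j (i : Int)) _ (List.nodup_cons.1 hnd).2 (chainL_tail L j st hch)
      refine ⟨j :: p, ?_, ?_, ?_, ?_⟩
      · rw [heq]; rw [List.cons_append, hp1]
      · intro k hk
        rw [heq, hp2 k (fun hkp => hk (List.mem_cons_of_mem _ hkp)),
          getD_set_ne R j k _ _ (by rintro rfl; exact hk List.mem_cons_self)]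
      · intro k hk hkR
        rcases List.mem_cons.1 hk with rfl | hk'
        · have hkp : k ∉ p := fun hkp =>
            hjst (hp1 ▸ List.mem_append.2 (Or.inl hkp))
          rw [heq, hp2 k hkp, getD_set_self R k _ _ hkR]
        · rw [heq]
          exact hp3 k hk' (by simpa using hkR)
      · rw [heq, hp4, List.foldl_cons, ifmax]
    · have heq : jPop limit m x i (j :: st) R b = (j :: st, R, b) := by
        simp only [jPop]; rw [if_neg h]
      exact ⟨[], by simp [heq], fun _ _ => by rw [heq], by simp, by simp [heq]⟩

-- the loop invariant of the joint machine -----------------------------------------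

def JInv (limit : Int) (m : List Int) (n i : Nat)
    (s : List Nat × List Int × List Int × Int) : Prop :=
  s.2.1.length = n ∧ s.2.2.1.length = n ∧
  (∀ j ∈ s.1, j < i) ∧
  chainL s.2.1 s.1 ∧
  (∀ j, i ≤ j → j < n → s.2.1.getD j 0 = -1) ∧
  (∀ j ∈ s.1, s.2.2.1.getD j 0 = (n : Int)) ∧
  (∀ j, i ≤ j → j < n → s.2.2.1.getD j 0 = (n : Int)) ∧
  ∃ p : List Nat, (p ++ s.1).Perm (List.range i) ∧
    s.2.2.2 = p.foldl (contrib limit m s.2.1 s.2.2.1) (-1)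

theorem jinv_step (limit : Int) (m : List Int) (n i : Nat) (hi : i < n)
    (s : List Nat × List Int × List Int × Int) (h : JInv limit m n i s) :
    JInv limit m n (i + 1) (jStep limit m s i) := by
  obtain ⟨hL, hR, hmem, hch, hLt, hRn, hRt, p, hperm, hb⟩ := h
  obtain ⟨st, L, R, b⟩ := s
  simp only at hL hR hmem hch hLt hRn hRt hperm hb ⊢
  have hndall : (p ++ st).Nodup := hperm.nodup_iff.2 (List.nodup_range)
  have hnd : st.Nodup := hndall.of_append_right
  have hdisj : ∀ k ∈ p, k ∉ st := fun k hk =>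
    (List.disjoint_of_nodup_append hndall) hk
  obtain ⟨pp, h1, h2, h3, h4⟩ :=
    jPop_spec limit m (m.getD i 0) i L st R b hnd hch
  set res := jPop limit m (m.getD i 0) i st R b with hres
  have hppst : ∀ k ∈ pp, k ∈ st := fun k hk => h1 ▸ List.mem_append.2 (Or.inl hk)
  have hstst : ∀ k ∈ res.1, k ∈ st := fun k hk => h1 ▸ List.mem_append.2 (Or.inr hk)
  have hppres : ∀ k ∈ pp, k ∉ res.1 := by
    intro k hk
    have : (pp ++ res.1).Nodup := h1 ▸ hnd
    exact (List.disjoint_of_nodup_append this) hk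
  have hmemp : ∀ k ∈ p, k < i := fun k hk =>
    List.mem_range.1 (hperm.mem_iff.1 (List.mem_append.2 (Or.inl hk)))
  -- the new left array
  have hch' : chainL L res.1 := chainL_suffix L pp res.1 (h1 ▸ hch)
  have hLlen : i < L.length := hL ▸ hi
  set L' := (match res.1 with
    | [] => L
    | j :: _ => L.set i (j : Int)) with hL'
  have hL'ne : ∀ k, k ≠ i → L'.getD k 0 = L.getD k 0 := by
    intro k hk
    rw [hL']
    cases res.1 with
    | nil => rfl
    | cons t ts => exact getD_set_ne L i k _ _ (fun hik => hk hik.symm)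
  have hL'len : L'.length = n := by
    rw [hL']; cases res.1 <;> simp [hL]
  have hR'len : res.2.1.length = n := by rw [hres, jPop_len]; exact hR
  have hstep : jStep limit m (st, L, R, b) i = (i :: res.1, L', res.2.1, res.2.2) := rfl
  rw [hstep]
  refine ⟨hL'len, hR'len, ?_, ?_, ?_, ?_, ?_, p ++ pp, ?_, ?_⟩
  · intro k hk
    rcases List.mem_cons.1 hk with rfl | hk'
    · omega
    · exact Nat.lt_succ_of_lt (hmem k (hstst k hk'))
  · -- chainL L' (i :: res.1)
    cases hres1 : res.1 with
    | nil =>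
      show chainL L' [i]
      show L'.getD i 0 = -1
      rw [hL', hres1]
      exact hLt i le_rfl hi
    | cons t ts =>
      refine ⟨?_, ?_⟩
      · show L'.getD i 0 = (t : Int)
        rw [hL', hres1]
        exact getD_set_self L i _ _ hLlen
      · refine chainL_congr L L' (t :: ts) ?_ (hres1 ▸ hch')
        intro k hk
        exact hL'ne k (by
          have : k ∈ st := hstst k (hres1 ▸ hk)
          have := hmem k this
          omega)
  · intro k hk hkn
    rw [hL'ne k (by omega)]
    exact hLt k (by omega) hkn
  · -- right values on the new stack are n
    intro k hk
    rcases List.mem_cons.1 hk with rfl | hk'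
    · have hkpp : k ∉ pp := fun hkpp => by
        have := hmem k (hppst k hkpp); omega
      rw [h2 k hkpp]
      exact hRt k le_rfl hi
    · have hkpp : k ∉ pp := fun hkpp => hppres k hkpp hk'
      rw [h2 k hkpp]
      exact hRn k (hstst k hk')
  · intro k hk hkn
    have hkpp : k ∉ pp := fun hkpp => by
      have := hmem k (hppst k hkpp); omega
    rw [h2 k hkpp]
    exact hRt k (by omega) hkn
  · -- permutation
    refine List.Perm.trans List.perm_middle ?_
    rw [List.append_assoc, h1, List.range_succ]
    exact (hperm.cons i).trans (List.perm_append_singleton i (List.range i)).symm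
  · -- best value
    rw [List.foldl_append, h4]
    have hstep1 : p.foldl (contrib limit m L' res.2.1) (-1)
        = p.foldl (contrib limit m L R) (-1) := by
      refine PySem.List.foldl_congr_mem _ _ _ _ (fun acc k hk => ?_)
      have hki : k < i := hmemp k hk
      have hkpp : k ∉ pp := fun hkpp => hdisj k hk (hppst k hkpp)
      unfold contrib
      rw [hL'ne k (by omega), h2 k hkpp]
    rw [hstep1, ← hb]
    refine PySem.List.foldl_congr_mem _ _ _ _ (fun acc k hk => ?_)
    have hki : k < i := hmem k (hppst k hk)
    unfold contrib
    rw [hL'ne k (by omega), h3 k hk (by omega)]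

theorem jinv_run (limit : Int) (m : List Int) (n : Nat) :
    ∀ (i : Nat), i ≤ n → JInv limit m n i (jRun limit m n i)
  | 0, _ => by
      have h0 : jRun limit m n 0
          = ([], List.replicate n (-1), List.replicate n (n : Int), -1) := rfl
      rw [h0]
      refine ⟨by simp, by simp, by simp, trivial, ?_, by simp, ?_, [], by simp, rfl⟩
      · intro j _ hj
        exact List.getD_replicate _ hj
      · intro j _ hj
        exact List.getD_replicate _ hj
  | i + 1, hi => by
      rw [jRun_succ]
      exact jinv_step limit m n i (by omega) (jRun limit m n i)
        (jinv_run limit m n i (by omega))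

-- the drain: B's pop at the sentinel i = n folds the remaining stack ---------------

theorem bPop_drain (limit : Int) (m L R : List Int) (n : Nat) :
    ∀ (st : List Nat) (b : Int), chainL L st → (∀ j ∈ st, R.getD j 0 = (n : Int)) →
      (bPop limit m n n st b).2 = st.foldl (contrib limit m L R) b := by
  intro st
  induction st with
  | nil => intro b _ _; rfl
  | cons j st ih =>
    intro b hch hRn
    have heq : bPop limit m n n (j :: st) b
        = bPop limit m n n st
            (if limit < m.getD j 0 * ((n : Int) - topVal st - 1) ∧
                b < (n : Int) - topVal st - 1
             then (n : Int) - topVal st - 1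
             else b) := by
      simp only [bPop, true_or, if_true]
    rw [← chainL_head L j st hch] at heq
    rw [heq, ih _ (chainL_tail L j st hch) (fun k hk => hRn k (List.mem_cons_of_mem _ hk)),
      List.foldl_cons]
    congr 1
    rw [ifmax]
    unfold contrib
    rw [hRn j List.mem_cons_self]

-- contrib is right-commutative ------------------------------------------------------

theorem contrib_comm (limit : Int) (m L R : List Int) (x y : Nat) (z : Int) :
    contrib limit m L R (contrib limit m L R z x) y
      = contrib limit m L R (contrib limit m L R z y) x := by
  unfold contrib
  split_ifs <;> omega

-- ===== VERDICT (by name: the statement is the Claim_ definition above) =====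
theorem getMaxGoodSubarrayLength_spec : Claim_equal_getMaxGoodSubarrayLength := by
  unfold Claim_equal_getMaxGoodSubarrayLength
  intro limit m _
  unfold Spec_getMaxGoodSubarrayLength
  obtain ⟨hL, hR, hmem, hch, hLt, hRn, hRt, p, hperm, hb⟩ :=
    jinv_run limit m m.length m.length le_rfl
  have h1 := congrArg Prod.snd (left_proj limit m m.length m.length)
  have h2 := congrArg Prod.snd (right_proj limit m m.length m.length)
  simp only at h1 h2
  have hA : getMaxGoodSubarrayLength limit m
      = (List.range m.length).foldl
          (contrib limit m (jRun limit m m.length m.length).2.1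
            (jRun limit m m.length m.length).2.2.1) (-1) := by
    show (List.range m.length).foldl
        (contrib limit m
          ((List.range m.length).foldl (aLeftStep m) ([], List.replicate m.length (-1))).2
          ((List.range m.length).foldl (aRightStep m)
            ([], List.replicate m.length (m.length : Int))).2) (-1) = _
    rw [h1, h2]
  have hB : getMaxGoodSubarrayLength_alt limit m
      = (p ++ (jRun limit m m.length m.length).1).foldl
          (contrib limit m (jRun limit m m.length m.length).2.1
            (jRun limit m m.length m.length).2.2.1) (-1) := by
    show ((List.range (m.length + 1)).foldl (bStep limit m m.length) ([], -1)).2 = _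
    rw [List.range_succ, List.foldl_append, b_proj limit m m.length m.length le_rfl]
    show (bPop limit m m.length m.length (jRun limit m m.length m.length).1
      (jRun limit m m.length m.length).2.2.2).2 = _
    rw [bPop_drain limit m (jRun limit m m.length m.length).2.1
        (jRun limit m m.length m.length).2.2.1 m.length
        (jRun limit m m.length m.length).1 (jRun limit m m.length m.length).2.2.2 hch hRn,
      List.foldl_append, ← hb]
  rw [hA, hB]
  exact (hperm.foldl_eq'
    (fun x _ y _ z => contrib_comm limit m (jRun limit m m.length m.length).2.1
      (jRun limit m m.length m.length).2.2.1 x y z) (-1)).symm
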